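-- pv_equiv track=rewrite | github.com/b2sdev/CodeSignal-Solutions | TheCore/D-Loop-Tunnel/lineup.py | solution
-- ===== SOURCE A (Python) =====
-- def solution(commands):
--     count = 0
--     status = 0
--     for command in commands:
--         if command == "L" or command == "R":
--             status += 1
--         if status % 2 == 0:
--             count += 1
--     return count
-- ===== SOURCE B (Python) =====
-- def solution(commands):
--     # Segment view: between consecutive direction commands the status is constant;
--     # sum the lengths of even-status segments instead of testing parity per element.
--     idx = [i for i, c in enumerate(commands) if c == "L" or c == "R"]
--     total = 0
--     prev = 0
--     status = 0
--     for b in idx + [len(commands)]: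
--         if status % 2 == 0:
--             total += b - prev
--         prev = b
--         status += 1
--     return total
-- ===== Notes on version B (the rewrite author's own statement) =====
-- stated objective: alternative
-- what changed: B groups the scan into parity-constant segments delimited by the L/R command indices and sums the lengths of even-status segments, instead of A's per-element parity test on a running counter.
import Mathlib
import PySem

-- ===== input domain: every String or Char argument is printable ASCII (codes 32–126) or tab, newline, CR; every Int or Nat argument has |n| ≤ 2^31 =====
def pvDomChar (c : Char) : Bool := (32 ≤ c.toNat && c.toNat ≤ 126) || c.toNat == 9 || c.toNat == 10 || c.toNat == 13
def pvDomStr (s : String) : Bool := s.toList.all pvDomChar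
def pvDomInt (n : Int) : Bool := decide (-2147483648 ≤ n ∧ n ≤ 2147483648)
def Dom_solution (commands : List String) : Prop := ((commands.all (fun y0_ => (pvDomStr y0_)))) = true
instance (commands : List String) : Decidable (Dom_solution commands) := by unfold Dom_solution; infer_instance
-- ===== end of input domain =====

-- B replaces A's per-element parity test by summing lengths of parity-constant segments
-- between direction-command indices (alternative decomposition, same O(n) cost).


-- ===== PORT A =====
-- literal port of A: one fold over commands carrying (count, status)
def solution (commands : List String) : Int :=
  (commands.foldl
    (fun (cs : Int × Int) command =>
      let status := if command == "L" || command == "R" then cs.2 + 1 else cs.2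
      let count := if PySem.Int.mod status 2 = 0 then cs.1 + 1 else cs.1
      (count, status))
    (0, 0)).1

-- ===== PORT B =====
-- port of B's comprehension '[i for i,c in enumerate(commands) if c in ("L","R")]':
-- enumerate ported as an index-threading recursion (exact: same indices, same order)
def dirIdx : List String → Int → List Int
  | [], _ => []
  | c :: rest, i =>
      if c == "L" || c == "R" then i :: dirIdx rest (i + 1) else dirIdx rest (i + 1)

-- port of B's loop over boundaries, state (total, prev, status)
def segFold : List Int → Int → Int → Int → Int
  | [], tot, _, _ => tot
  | b :: bs, tot, prev, st =>
      segFold bs (if PySem.Int.mod st 2 = 0 then tot + (b - prev) else tot) b (st + 1)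

def solution_alt (commands : List String) : Int :=
  segFold (dirIdx commands 0 ++ [(commands.length : Int)]) 0 0 0

-- ===== PRECONDITION & SPEC =====
def Spec_solution (commands : List String) (out : Int) : Prop := out = solution_alt commands
instance (commands : List String) (out : Int) : Decidable (Spec_solution commands out) := by unfold Spec_solution; infer_instance

-- ===== CLAIM (what is proved, stated in full; the proofs are below) =====
def Claim_equal_solution : Prop := ∀ (commands : List String), Dom_solution commands → Spec_solution commands (solution commands)

-- ===== LEMMAS AND PROOFS =====

-- the total accumulator is additive
theorem segFold_tot (bs : List Int) (tot prev st : Int) :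
    segFold bs tot prev st = tot + segFold bs 0 prev st := by
  induction bs generalizing tot prev st with
  | nil => simp [segFold]
  | cons b bs ih =>
      simp only [segFold]
      rw [ih (if PySem.Int.mod st 2 = 0 then tot + (b - prev) else tot) b (st + 1),
          ih (if PySem.Int.mod st 2 = 0 then 0 + (b - prev) else 0) b (st + 1)]
      split_ifs <;> ring

-- shifting every boundary and prev by 1 leaves the sums unchanged
theorem segFold_shift (bs : List Int) (tot prev st : Int) :
    segFold (bs.map (fun x => x + 1)) tot (prev + 1) st = segFold bs tot prev st := by
  induction bs generalizing tot prev st with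
  | nil => simp [segFold]
  | cons b bs ih =>
      simp only [List.map_cons, segFold]
      rw [ih]
      congr 1
      split_ifs <;> ring

-- shifting the boundaries by 1 while keeping prev = 0 adds one even-status cell
theorem segFold_map_succ (b : Int) (bs : List Int) (st : Int) :
    segFold ((b :: bs).map (fun x => x + 1)) 0 0 st
      = segFold (b :: bs) 0 0 st + (if PySem.Int.mod st 2 = 0 then 1 else 0) := by
  have hsh := segFold_shift (b :: bs) 0 (-1) st
  norm_num at hsh
  rw [List.map_cons, hsh]
  simp only [segFold]
  rw [segFold_tot bs (if PySem.Int.mod st 2 = 0 then 0 + (b - -1) else 0) b (st + 1),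
      segFold_tot bs (if PySem.Int.mod st 2 = 0 then 0 + (b - 0) else 0) b (st + 1)]
  split_ifs <;> ring

theorem dirIdx_shift (cmds : List String) (i : Int) :
    dirIdx cmds (i + 1) = (dirIdx cmds i).map (fun x => x + 1) := by
  induction cmds generalizing i with
  | nil => simp [dirIdx]
  | cons c rest ih =>
      simp only [dirIdx]
      split_ifs <;> simp [ih]

-- the boundary list always ends with the length, so it is nonempty
theorem exists_cons (cmds : List String) :
    ∃ b bs, dirIdx cmds 0 ++ [(cmds.length : Int)] = b :: bs := by
  cases h : dirIdx cmds 0 ++ [(cmds.length : Int)] with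
  | nil => exact absurd h (by simp)
  | cons b bs => exact ⟨b, bs, rfl⟩

-- main invariant: A's fold from (c, st) equals c plus B's segment sum at status st
theorem main_inv (cmds : List String) (c st : Int) :
    (cmds.foldl
      (fun (cs : Int × Int) command =>
        let status := if command == "L" || command == "R" then cs.2 + 1 else cs.2
        let count := if PySem.Int.mod status 2 = 0 then cs.1 + 1 else cs.1
        (count, status))
      (c, st)).1
    = c + segFold (dirIdx cmds 0 ++ [(cmds.length : Int)]) 0 0 st := by
  induction cmds generalizing c st with
  | nil => simp [dirIdx, segFold]
  | cons x rest ih =>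
      obtain ⟨b, bs, hcons⟩ := exists_cons rest
      have hB1 : dirIdx rest 1 = (dirIdx rest 0).map (fun x => x + 1) := by
        have h := dirIdx_shift rest 0
        norm_num at h
        exact h
      have hlen : ((x :: rest).length : Int) = (rest.length : Int) + 1 := by
        simp
      have hmap : dirIdx rest 1 ++ [(rest.length : Int) + 1]
          = (dirIdx rest 0 ++ [(rest.length : Int)]).map (fun x => x + 1) := by
        simp [hB1]
      by_cases hx : x == "L" || x == "R"
      · -- direction command: boundary 0 in front, then the shifted tail boundaries
        simp only [List.foldl_cons, hx, if_true, hlen, dirIdx, zero_add]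
        rw [ih]
        have h0 : (if PySem.Int.mod st 2 = 0 then (0:Int) + (0 - 0) else 0) = 0 := by
          split_ifs <;> ring
        simp only [List.cons_append, segFold, h0]
        rw [hmap, hcons, segFold_map_succ]
        split_ifs <;> ring
      · -- non-direction command: same status, one even-status cell consumed up front
        simp only [List.foldl_cons, hx, if_false, Bool.false_eq_true, hlen, dirIdx, zero_add]
        rw [ih]
        rw [hmap, hcons, segFold_map_succ]
        split_ifs <;> ring

-- ===== VERDICT (by name: the statement is the Claim_ definition above) =====
theorem solution_spec : Claim_equal_solution := by
  intro commands _
  unfold Spec_solution solution solution_alt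
  rw [main_inv]
  ring
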